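-- pv_equiv track=rewrite | github.com/feli-santos/rl-iot-defense-system | src/attack_simulation.py | _create_device_layers
-- ===== SOURCE A (Python) =====
-- from typing import Dict, List, Tuple
--
-- def _create_device_layers(num_devices: int) -> List[List[int]]:
--     """
--     Create hierarchical layers of devices for the attack graph.
--     This ensures the monotonicity property mentioned in the paper.
--
--     Args:
--         num_devices: Total number of devices
--
--     Returns:
--         List of layers where each layer contains device indices
--     """
--     # Determine number of layers (3-5 layers)
--     num_layers = min(max(3, num_devices // 4), 5)
--
--     # Distribute devices across layers
--     layers = []
--     devices_per_layer = num_devices // num_layers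
--     remaining = num_devices % num_layers
--
--     for i in range(num_layers):
--         layer_size = devices_per_layer + (1 if i < remaining else 0)
--         start_idx = sum(len(l) for l in layers)
--         layer = list(range(start_idx, start_idx + layer_size))
--         layers.append(layer)
--
--     return layers
-- ===== SOURCE B (Python) =====
-- from typing import Dict, List, Tuple
--
-- def _create_device_layers(num_devices: int) -> List[List[int]]:
--     """Partition device indices into 3-5 contiguous layers using closed-form
--     layer boundaries bound(i) = i*base + min(i, rem): a stateless comprehension
--     instead of a stateful loop."""
--     num_layers = min(max(3, num_devices // 4), 5)
--     base, rem = divmod(num_devices, num_layers)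
--     bound = lambda i: i * base + min(i, rem)
--     return [list(range(bound(i), bound(i + 1))) for i in range(num_layers)]
-- ===== Notes on version B (the rewrite author's own statement) =====
-- stated objective: simpler
-- what changed: B replaces A's stateful loop (which appends layers and recomputes each start index by summing the lengths of all previously built layers) with a closed-form boundary formula bound(i) = i*base + min(i, rem) and a stateless list comprehension over the layer indices.
import Mathlib
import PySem

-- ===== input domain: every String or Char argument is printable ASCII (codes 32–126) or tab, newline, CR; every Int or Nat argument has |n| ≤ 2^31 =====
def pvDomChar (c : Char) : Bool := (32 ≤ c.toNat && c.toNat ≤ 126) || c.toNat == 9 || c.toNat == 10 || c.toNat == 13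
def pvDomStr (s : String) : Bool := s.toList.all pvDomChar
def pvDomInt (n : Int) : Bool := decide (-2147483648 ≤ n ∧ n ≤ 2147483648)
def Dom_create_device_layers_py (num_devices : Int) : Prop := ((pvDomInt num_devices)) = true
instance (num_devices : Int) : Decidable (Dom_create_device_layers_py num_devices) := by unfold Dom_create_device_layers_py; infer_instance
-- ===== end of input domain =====

-- B replaces A's stateful loop with per-iteration re-summation of previous layer
-- lengths by a closed-form boundary formula and a stateless map (objective: simpler).

-- ===== PORT A =====
def create_device_layers_py (num_devices : Int) : List (List Int) :=
  let num_layers := min (max 3 (PySem.Int.floordiv num_devices 4)) 5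
  let devices_per_layer := PySem.Int.floordiv num_devices num_layers
  let remaining := PySem.Int.mod num_devices num_layers
  (PySem.List.pyRange 0 num_layers 1).foldl (fun layers i =>
    let layer_size := devices_per_layer + (if i < remaining then 1 else 0)
    let start_idx := layers.foldl (fun s l => s + (l.length : Int)) 0
    layers ++ [PySem.List.pyRange start_idx (start_idx + layer_size) 1]) []

-- ===== PORT B =====
def create_device_layers_py_alt (num_devices : Int) : List (List Int) :=
  let num_layers := min (max 3 (PySem.Int.floordiv num_devices 4)) 5
  let base := PySem.Int.floordiv num_devices num_layers
  let rem := PySem.Int.mod num_devices num_layers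
  let bound := fun (i : Int) => i * base + min i rem
  (PySem.List.pyRange 0 num_layers 1).map (fun i =>
    PySem.List.pyRange (bound i) (bound (i + 1)) 1)

-- ===== PRECONDITION & SPEC =====
def Spec_create_device_layers_py (num_devices : Int) (out : List (List Int)) : Prop := out = create_device_layers_py_alt num_devices
instance (num_devices : Int) (out : List (List Int)) : Decidable (Spec_create_device_layers_py num_devices out) := by unfold Spec_create_device_layers_py; infer_instance

-- ===== CLAIM (what is proved, stated in full; the proofs are below) =====
def Claim_equal_create_device_layers_py : Prop := ∀ (num_devices : Int), Dom_create_device_layers_py num_devices → Spec_create_device_layers_py num_devices (create_device_layers_py num_devices)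

-- ===== LEMMAS AND PROOFS =====

-- case 0 ≤ base: A's running sum of layer lengths equals the closed-form boundary
lemma pv_pos_inv (base rem : Int) (hb : 0 ≤ base) :
    ∀ (m : Nat) (a : Int) (acc : List (List Int)),
      acc.foldl (fun s l => s + (l.length : Int)) 0 = a * base + min a rem →
      (PySem.List.pyRange a (a + m) 1).foldl (fun layers i =>
        let layer_size := base + (if i < rem then 1 else 0)
        let start_idx := layers.foldl (fun s l => s + (l.length : Int)) 0
        layers ++ [PySem.List.pyRange start_idx (start_idx + layer_size) 1]) acc
      =
      acc ++ (PySem.List.pyRange a (a + m) 1).map (fun i =>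
        PySem.List.pyRange (i * base + min i rem) ((i + 1) * base + min (i + 1) rem) 1) := by
  intro m
  induction m with
  | zero =>
    intro a acc _
    rw [PySem.List.pyRange_one_eq_nil (by omega)]
    simp
  | succ m ih =>
    intro a acc hacc
    have hlt : a < a + ((m : Int) + 1) := by omega
    rw [show ((m + 1 : Nat) : Int) = (m : Int) + 1 by push_cast; ring] at *
    rw [PySem.List.pyRange_one_cons hlt]
    simp only [List.foldl_cons, List.map_cons]
    have hsz : (0:Int) ≤ base + (if a < rem then 1 else 0) := by split <;> omega
    have hstart : acc.foldl (fun s l => s + (l.length : Int)) 0 = a * base + min a rem := hacc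
    have hbd : a * base + min a rem + (base + (if a < rem then 1 else 0))
        = (a + 1) * base + min (a + 1) rem := by
      have hx : (a + 1) * base = a * base + base := by ring
      split <;> omega
    have hnext :
        (acc ++ [PySem.List.pyRange (a * base + min a rem)
            (a * base + min a rem + (base + (if a < rem then 1 else 0))) 1]).foldl
          (fun s l => s + (l.length : Int)) 0
        = (a + 1) * base + min (a + 1) rem := by
      rw [List.foldl_append]
      simp only [List.foldl_cons, List.foldl_nil, PySem.List.length_pyRange_one]
      omega
    have := ih (a + 1)
      (acc ++ [PySem.List.pyRange (a * base + min a rem)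
        (a * base + min a rem + (base + (if a < rem then 1 else 0))) 1]) hnext
    rw [show a + 1 + (m : Int) = a + ((m : Int) + 1) by ring] at this
    simp only [hstart]
    rw [this, hbd]
    simp

-- case base < 0: every layer size is ≤ 0, so every layer is empty in both programs
lemma pv_neg_A (base rem : Int) (hb : base < 0) :
    ∀ (idxs : List Int) (acc : List (List Int)),
      idxs.foldl (fun layers i =>
        let layer_size := base + (if i < rem then 1 else 0)
        let start_idx := layers.foldl (fun s l => s + (l.length : Int)) 0
        layers ++ [PySem.List.pyRange start_idx (start_idx + layer_size) 1]) acc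
      = acc ++ idxs.map (fun _ => []) := by
  intro idxs
  induction idxs with
  | nil => intro acc; simp
  | cons i idxs ih =>
    intro acc
    simp only [List.foldl_cons, List.map_cons]
    rw [ih]
    have : ∀ st : Int, PySem.List.pyRange st (st + (base + (if i < rem then 1 else 0))) 1 = [] := by
      intro st
      apply PySem.List.pyRange_one_eq_nil
      split <;> omega
    simp [this]

lemma pv_neg_B (base rem : Int) (hb : base < 0) (idxs : List Int) :
    idxs.map (fun i =>
      PySem.List.pyRange (i * base + min i rem) ((i + 1) * base + min (i + 1) rem) 1)
    = idxs.map (fun _ => ([] : List Int)) := by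
  apply List.map_congr_left
  intro i _
  apply PySem.List.pyRange_one_eq_nil
  have : (i + 1) * base = i * base + base := by ring
  omega

-- ===== VERDICT (by name: the statement is the Claim_ definition above) =====
theorem create_device_layers_py_spec : Claim_equal_create_device_layers_py := by
  intro n _
  unfold Spec_create_device_layers_py create_device_layers_py create_device_layers_py_alt
  simp only []
  set k := min (max 3 (PySem.Int.floordiv n 4)) 5 with hk
  set base := PySem.Int.floordiv n k with hbase
  set rem := PySem.Int.mod n k with hrem
  by_cases h : 0 ≤ base
  · have hk3 : (3:Int) ≤ k := by
      rw [hk]; omega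
    have hrnn : 0 ≤ rem := PySem.Int.mod_nonneg n (by omega)
    have := pv_pos_inv base rem h k.toNat 0 []
      (by simp [min_eq_left hrnn])
    rw [show (0:Int) + (k.toNat : Int) = k by omega] at this
    simpa using this
  · push Not at h
    rw [pv_neg_A base rem h, pv_neg_B base rem h]
    simp
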